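-- pv_equiv track=rewrite | github.com/natalievolk/Gomoku-AI-Player | gomoku.py | detect_row
-- ===== SOURCE A (Python) =====
-- def is_bounded(board, y_end, x_end, length, d_y, d_x):
--     # making x, y variables to indicate start of sequence
--     y_start = y_end - (length - 1) * d_y
--     x_start = x_end - (length - 1) * d_x
--
--     boundedness = [False, False]
--
--     if 8 > x_start - d_x >= 0 and 8 > y_start - d_y >= 0:
--         if board[y_start - d_y][x_start - d_x] == " ":
--             boundedness[0] = True
--
--     if 8 > x_end + d_x >= 0 and 8 > y_end + d_y >= 0:
--         if board[y_end + d_y][x_end + d_x] == " ":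
--             boundedness[1] = True
--
--     if boundedness[0] == boundedness[1] == True:
--         return "OPEN"
--     elif boundedness[0] == boundedness[1] == False:
--         return "CLOSED"
--     else:
--         return "SEMIOPEN"
--
-- def detect_row(board, col, y_start, x_start, length, d_y, d_x):
--
--     count_semiopen, count_open = 0, 0
--
--     i = 0
--     while i < len(board):
--
--         y_curr = y_start + i * d_y
--         x_curr = x_start + i * d_x
--
--         count = 1
--
--         if not ((0 <= y_curr < 8) and (0 <= x_curr < 8)):
--             break
--
--         while (board[y_curr][x_curr] == col) and (0 <= y_curr + d_y < 8) and (0 <= x_curr + d_x < 8):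
--             if board[y_curr + d_y][x_curr + d_x] != col:
--                 break
--             y_curr += d_y
--             x_curr += d_x
--             count += 1
--
--         i += count
--
--         if count != length:
--             continue
--
--         if is_bounded(board, y_curr, x_curr, length, d_y, d_x) == "SEMIOPEN":
--                 count_semiopen += 1
--         elif is_bounded(board, y_curr, x_curr, length, d_y, d_x) == "OPEN":
--             count_open += 1
--
--     return count_open, count_semiopen
-- ===== SOURCE B (Python) =====
-- def detect_row(board, col, y_start, x_start, length, d_y, d_x):
--     # collect the ray of on-board cells once, then do a pure run-scan over that list
--     line = []
--     y, x = y_start, x_start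
--     while 0 <= y < 8 and 0 <= x < 8:
--         line.append(board[y][x])
--         y += d_y
--         x += d_x
--     py, px = y_start - d_y, x_start - d_x
--     left_open = 0 <= py < 8 and 0 <= px < 8 and board[py][px] == " "
--     count_open, count_semiopen = 0, 0
--     i, n = 0, len(line)
--     while i < n:
--         c = line[i]
--         j = i + 1
--         if c == col:
--             while j < n and line[j] == col:
--                 j += 1
--         if j - i == length:
--             right_open = j < n and line[j] == " "
--             if left_open and right_open:
--                 count_open += 1
--             elif left_open or right_open:
--                 count_semiopen += 1
--         left_open = c == " "
--         i = j
--     return count_open, count_semiopen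
-- ===== Notes on version B (the rewrite author's own statement) =====
-- stated objective: alternative
-- what changed: B first materialises the ray of on-board cells as a flat list, then does a pure run-grouping scan over that list with a carried left-flank flag, counting open ends directly (0/1/2) instead of A's coordinate-walking nested while loops that re-derive the run's endpoints and call the board-indexing helper is_bounded twice per run.
-- outside the precondition, e.g. on detect_row([], 'x', 0, 0, 1, 0, 1): A returns (0, 0), B raises IndexError
import Mathlib
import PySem

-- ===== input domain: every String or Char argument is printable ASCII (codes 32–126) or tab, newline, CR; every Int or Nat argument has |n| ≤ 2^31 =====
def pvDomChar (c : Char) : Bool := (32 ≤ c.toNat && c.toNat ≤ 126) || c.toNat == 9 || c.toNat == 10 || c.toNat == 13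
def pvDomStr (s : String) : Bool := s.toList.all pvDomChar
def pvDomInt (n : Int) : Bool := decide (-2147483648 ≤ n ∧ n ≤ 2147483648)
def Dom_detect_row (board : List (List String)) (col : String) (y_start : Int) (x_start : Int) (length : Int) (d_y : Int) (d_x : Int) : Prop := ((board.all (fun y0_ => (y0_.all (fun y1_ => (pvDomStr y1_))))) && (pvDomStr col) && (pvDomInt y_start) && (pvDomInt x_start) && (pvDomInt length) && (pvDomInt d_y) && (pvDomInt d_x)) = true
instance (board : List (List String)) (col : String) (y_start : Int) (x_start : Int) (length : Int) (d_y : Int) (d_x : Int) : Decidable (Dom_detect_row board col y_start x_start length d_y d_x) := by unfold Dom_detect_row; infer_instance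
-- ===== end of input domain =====

-- B materialises the ray of on-board cells as a flat list and does one pure run-grouping
-- scan over it (alternative decomposition; A walks board coordinates with nested loops).

-- ===== PORT A =====
-- board[y][x] (only evaluated by either Python after a 0 ≤ · < 8 bounds test; under
-- Pre_ the first 8 rows exist and have ≥ 8 cells, so the getD defaults are never used)
def pvAt (board : List (List String)) (y x : Int) : String :=
  (PySem.List.pyGet? ((PySem.List.pyGet? board y).getD []) x).getD ""

-- literal port of is_bounded
def isBounded (board : List (List String)) (y_end x_end length d_y d_x : Int) : String :=
  let ys := y_end - (length - 1) * d_y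
  let xs := x_end - (length - 1) * d_x
  let b0 : Bool := decide (8 > xs - d_x ∧ xs - d_x ≥ 0 ∧ 8 > ys - d_y ∧ ys - d_y ≥ 0)
                   && decide (pvAt board (ys - d_y) (xs - d_x) = " ")
  let b1 : Bool := decide (8 > x_end + d_x ∧ x_end + d_x ≥ 0 ∧ 8 > y_end + d_y ∧ y_end + d_y ≥ 0)
                   && decide (pvAt board (y_end + d_y) (x_end + d_x) = " ")
  if b0 && b1 then "OPEN" else if !b0 && !b1 then "CLOSED" else "SEMIOPEN"

-- A's inner while loop (fuel 16 is enough under Pre_: with (d_y,d_x) ≠ (0,0) the walk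
-- stays inside the 8×8 bound for at most 8 steps)
def innerA (board : List (List String)) (col : String) (d_y d_x : Int) :
    Nat → Int → Int → Int → Int × Int × Int
  | 0, y, x, c => (y, x, c)
  | Nat.succ f, y, x, c =>
    if pvAt board y x = col ∧ 0 ≤ y + d_y ∧ y + d_y < 8 ∧ 0 ≤ x + d_x ∧ x + d_x < 8 then
      if ¬ (pvAt board (y + d_y) (x + d_x) = col) then (y, x, c)
      else innerA board col d_y d_x f (y + d_y) (x + d_x) (c + 1)
    else (y, x, c)

-- A's outer while loop; fuel board.length matches "while i < len(board)" (i grows by ≥ 1)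
def outerA (board : List (List String)) (col : String) (y0 x0 len d_y d_x : Int) :
    Nat → Int → Int → Int → Int × Int
  | 0, _, co, cs => (co, cs)
  | Nat.succ f, i, co, cs =>
    if i < (board.length : Int) then
      let y := y0 + i * d_y
      let x := x0 + i * d_x
      if ¬ (0 ≤ y ∧ y < 8 ∧ 0 ≤ x ∧ x < 8) then (co, cs)
      else
        let r := innerA board col d_y d_x 16 y x 1
        if r.2.2 ≠ len then outerA board col y0 x0 len d_y d_x f (i + r.2.2) co cs
        else if isBounded board r.1 r.2.1 len d_y d_x = "SEMIOPEN" then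
          outerA board col y0 x0 len d_y d_x f (i + r.2.2) co (cs + 1)
        else if isBounded board r.1 r.2.1 len d_y d_x = "OPEN" then
          outerA board col y0 x0 len d_y d_x f (i + r.2.2) (co + 1) cs
        else outerA board col y0 x0 len d_y d_x f (i + r.2.2) co cs
    else (co, cs)

def detect_row (board : List (List String)) (col : String) (y_start : Int) (x_start : Int) (length : Int) (d_y : Int) (d_x : Int) : Int × Int :=
  outerA board col y_start x_start length d_y d_x board.length 0 0 0

-- ===== PORT B =====
-- the "while 0 <= y < 8 and 0 <= x < 8: line.append(...)" loop of B (fuel 16 suffices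
-- under Pre_, same bound as above)
def lineB (board : List (List String)) (d_y d_x : Int) : Nat → Int → Int → List String
  | 0, _, _ => []
  | Nat.succ f, y, x =>
    if 0 ≤ y ∧ y < 8 ∧ 0 ≤ x ∧ x < 8 then
      pvAt board y x :: lineB board d_y d_x f (y + d_y) (x + d_x)
    else []

-- B's inner "while j < n and line[j] == col" scan: (number of leading col cells, remainder)
def runSplit (col : String) : List String → Nat × List String
  | [] => (0, [])
  | c :: rest =>
    if c = col then ((runSplit col rest).1 + 1, (runSplit col rest).2) else (0, c :: rest)

-- needed by scanB's termination measure
theorem runSplit_snd_len_le (col : String) : ∀ l : List String, (runSplit col l).2.length ≤ l.length := by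
  intro l
  induction l with
  | nil => simp [runSplit]
  | cons c rest ih =>
    simp only [runSplit]
    split
    · exact Nat.le_succ_of_le ih
    · simp

-- B's main "while i < n" scan, carrying the left-flank flag
def scanB (col : String) (len : Int) : List String → Bool → Int → Int → Int × Int
  | [], _, co, cs => (co, cs)
  | c :: rest, lo, co, cs =>
    let p := if c = col then runSplit col rest else (0, rest)
    let r : Int := 1 + (p.1 : Int)
    let ro : Bool := decide (p.2.head? = some " ")
    let acc :=
      if r = len then
        if lo && ro then (co + 1, cs)
        else if lo || ro then (co, cs + 1)
        else (co, cs)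
      else (co, cs)
    scanB col len p.2 (decide (c = " ")) acc.1 acc.2
termination_by l _ _ _ => l.length
decreasing_by
  split
  · exact Nat.lt_succ_of_le (runSplit_snd_len_le col rest)
  · simp

def detect_row_alt (board : List (List String)) (col : String) (y_start : Int) (x_start : Int) (length : Int) (d_y : Int) (d_x : Int) : Int × Int :=
  let L := lineB board d_y d_x 16 y_start x_start
  let lo : Bool :=
    decide (0 ≤ y_start - d_y ∧ y_start - d_y < 8 ∧ 0 ≤ x_start - d_x ∧ x_start - d_x < 8)
    && decide (pvAt board (y_start - d_y) (x_start - d_x) = " ")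
  scanB col length L lo 0 0

-- ===== PRECONDITION & SPEC =====
-- Pre_ admits (a) the function's natural domain (a Gomoku board: the code hardcodes the
-- 8×8 bound: at least 8 rows whose first 8 each have at least 8 cells) with a direction
-- (d_y,d_x) ≠ (0,0) — on smaller boards A raises IndexError for any visited cell, and with
-- direction (0,0) A loops forever whenever the ray meets a col cell and B's line
-- construction never terminates — and (b) inputs whose start (and its back-flank) lies
-- outside the 0..7 square, where no cell is ever read (A returns (0,0) immediately; a
-- start outside but back-flank inside is excluded because B reads that flank cell there).
def Pre_detect_row (board : List (List String)) (col : String) (y_start : Int) (x_start : Int) (length : Int) (d_y : Int) (d_x : Int) : Prop :=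
  (8 ≤ board.length ∧ (∀ row ∈ board.take 8, 8 ≤ row.length) ∧ ¬(d_y = 0 ∧ d_x = 0))
  ∨ (¬(0 ≤ y_start ∧ y_start < 8 ∧ 0 ≤ x_start ∧ x_start < 8)
     ∧ ¬(0 ≤ y_start - d_y ∧ y_start - d_y < 8 ∧ 0 ≤ x_start - d_x ∧ x_start - d_x < 8))

instance (board : List (List String)) (col : String) (y_start : Int) (x_start : Int) (length : Int) (d_y : Int) (d_x : Int) : Decidable (Pre_detect_row board col y_start x_start length d_y d_x) := by
  unfold Pre_detect_row; infer_instance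

def pvWitness_detect_row : List (List String) × String × Int × Int × Int × Int × Int :=
  ([[" ", "x", "x", " ", " ", " ", " ", " "],
    [" ", " ", " ", " ", " ", " ", " ", " "],
    [" ", " ", " ", " ", " ", " ", " ", " "],
    [" ", " ", " ", " ", " ", " ", " ", " "],
    [" ", " ", " ", " ", " ", " ", " ", " "],
    [" ", " ", " ", " ", " ", " ", " ", " "],
    [" ", " ", " ", " ", " ", " ", " ", " "],
    [" ", " ", " ", " ", " ", " ", " ", " "]], "x", 0, 0, 2, 0, 1)

def Spec_detect_row (board : List (List String)) (col : String) (y_start : Int) (x_start : Int) (length : Int) (d_y : Int) (d_x : Int) (out : Int × Int) : Prop := out = detect_row_alt board col y_start x_start length d_y d_x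
instance (board : List (List String)) (col : String) (y_start : Int) (x_start : Int) (length : Int) (d_y : Int) (d_x : Int) (out : Int × Int) : Decidable (Spec_detect_row board col y_start x_start length d_y d_x out) := by unfold Spec_detect_row; infer_instance

-- ===== CLAIM (what is proved, stated in full; the proofs are below) =====
def Claim_equal_detect_row : Prop := ∀ (board : List (List String)) (col : String) (y_start : Int) (x_start : Int) (length : Int) (d_y : Int) (d_x : Int), Dom_detect_row board col y_start x_start length d_y d_x → Pre_detect_row board col y_start x_start length d_y d_x → Spec_detect_row board col y_start x_start length d_y d_x (detect_row board col y_start x_start length d_y d_x)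

-- ===== LEMMAS AND PROOFS =====

-- in-bounds predicate of both Pythons' "0 <= · < 8" tests
abbrev InbP (y x : Int) : Prop := 0 ≤ y ∧ y < 8 ∧ 0 ≤ x ∧ x < 8

-- number of steps the walk can still take before leaving the 8×8 square
def remf (d_y d_x y x : Int) : Int :=
  if 0 < d_y then 8 - y else if d_y < 0 then y + 1 else if 0 < d_x then 8 - x else x + 1

theorem remf_pos (d_y d_x y x : Int) (h : InbP y x) :
    1 ≤ remf d_y d_x y x ∧ remf d_y d_x y x ≤ 8 := by
  obtain ⟨h1, h2, h3, h4⟩ := h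
  unfold remf; split_ifs <;> omega

theorem remf_step (d_y d_x y x : Int) (hd : ¬(d_y = 0 ∧ d_x = 0)) (h : InbP y x) :
    remf d_y d_x (y + d_y) (x + d_x) ≤ remf d_y d_x y x - 1 := by
  obtain ⟨h1, h2, h3, h4⟩ := h
  unfold remf; split_ifs <;> omega

theorem lineB_nil (board : List (List String)) (d_y d_x y x : Int) (h : ¬ InbP y x) :
    ∀ f : Nat, lineB board d_y d_x f y x = [] := by
  intro f
  cases f with
  | zero => rfl
  | succ f => simp only [lineB]; rw [if_neg (by simpa [InbP] using h)]

theorem lineB_cons (board : List (List String)) (d_y d_x y x : Int) (h : InbP y x) (f : Nat) :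
    lineB board d_y d_x (f + 1) y x
      = pvAt board y x :: lineB board d_y d_x f (y + d_y) (x + d_x) := by
  simp only [lineB]; rw [if_pos (by simpa [InbP] using h)]

theorem lineB_congr (board : List (List String)) (d_y d_x : Int) (hd : ¬(d_y = 0 ∧ d_x = 0)) :
    ∀ (m f g : Nat) (y x : Int), (InbP y x → remf d_y d_x y x ≤ (m : Int)) →
      m ≤ f → m ≤ g → lineB board d_y d_x f y x = lineB board d_y d_x g y x := by
  intro m
  induction m with
  | zero =>
    intro f g y x hr _ _
    have hni : ¬ InbP y x := fun h => by have := (remf_pos d_y d_x y x h).1; have := hr h; omega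
    rw [lineB_nil _ _ _ _ _ hni, lineB_nil _ _ _ _ _ hni]
  | succ m ih =>
    intro f g y x hr hf hg
    by_cases hI : InbP y x
    · cases f with
      | zero => omega
      | succ f =>
        cases g with
        | zero => omega
        | succ g =>
          rw [lineB_cons _ _ _ _ _ hI, lineB_cons _ _ _ _ _ hI]
          congr 1
          exact ih f g _ _
            (fun hI' => by have := remf_step d_y d_x y x hd hI; have := hr hI; omega)
            (by omega) (by omega)
    · rw [lineB_nil _ _ _ _ _ hI, lineB_nil _ _ _ _ _ hI]

theorem lineB_len (board : List (List String)) (d_y d_x : Int) (hd : ¬(d_y = 0 ∧ d_x = 0)) :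
    ∀ (f : Nat) (y x : Int),
      ((lineB board d_y d_x f y x).length : Int) ≤ max (remf d_y d_x y x) 0 := by
  intro f
  induction f with
  | zero => intro y x; simp [lineB]
  | succ f ih =>
    intro y x
    by_cases hI : InbP y x
    · rw [lineB_cons _ _ _ _ _ hI]
      have h1 := ih (y + d_y) (x + d_x)
      have h2 := remf_step d_y d_x y x hd hI
      have h3 := (remf_pos d_y d_x y x hI).1
      simp only [List.length_cons]
      push_cast
      omega
    · rw [lineB_nil _ _ _ _ _ hI]; simp

theorem lineB_len8 (board : List (List String)) (d_y d_x : Int) (hd : ¬(d_y = 0 ∧ d_x = 0))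
    (f : Nat) (y x : Int) : ((lineB board d_y d_x f y x).length : Int) ≤ 8 := by
  by_cases hI : InbP y x
  · have h1 := lineB_len board d_y d_x hd f y x
    have h2 := (remf_pos d_y d_x y x hI).2
    omega
  · rw [lineB_nil _ _ _ _ _ hI]; simp

theorem runSplit_len (col : String) :
    ∀ l : List String, ((runSplit col l).1 : Int) + (runSplit col l).2.length = l.length := by
  intro l
  induction l with
  | nil => simp [runSplit]
  | cons c rest ih =>
    simp only [runSplit, List.length_cons]
    split
    · push_cast at ih ⊢; omega
    · simp

theorem inner_stop (board : List (List String)) (col : String) (d_y d_x : Int)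
    (y x c : Int) (h : ¬ (pvAt board y x = col ∧ 0 ≤ y + d_y ∧ y + d_y < 8 ∧ 0 ≤ x + d_x ∧ x + d_x < 8)) :
    ∀ fI : Nat, innerA board col d_y d_x fI y x c = (y, x, c) := by
  intro fI
  cases fI with
  | zero => rfl
  | succ f => simp only [innerA]; rw [if_neg h]

-- the inner while loop of A computes exactly the run that runSplit finds on the line
theorem inner_spec (board : List (List String)) (col : String) (d_y d_x : Int)
    (hd : ¬(d_y = 0 ∧ d_x = 0)) :
    ∀ (m fI fL : Nat) (y x c : Int),
      InbP y x → remf d_y d_x y x ≤ (m : Int) + 1 → m ≤ fI → m ≤ fL →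
      pvAt board y x = col →
      (innerA board col d_y d_x fI y x c
          = (y + ((runSplit col (lineB board d_y d_x fL (y + d_y) (x + d_x))).1 : Int) * d_y,
             x + ((runSplit col (lineB board d_y d_x fL (y + d_y) (x + d_x))).1 : Int) * d_x,
             c + ((runSplit col (lineB board d_y d_x fL (y + d_y) (x + d_x))).1 : Int)))
      ∧ (runSplit col (lineB board d_y d_x fL (y + d_y) (x + d_x))).2
          = lineB board d_y d_x (fL - (runSplit col (lineB board d_y d_x fL (y + d_y) (x + d_x))).1)
              (y + (((runSplit col (lineB board d_y d_x fL (y + d_y) (x + d_x))).1 : Int) + 1) * d_y)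
              (x + (((runSplit col (lineB board d_y d_x fL (y + d_y) (x + d_x))).1 : Int) + 1) * d_x)
      ∧ (runSplit col (lineB board d_y d_x fL (y + d_y) (x + d_x))).1 ≤ m
      ∧ InbP (y + ((runSplit col (lineB board d_y d_x fL (y + d_y) (x + d_x))).1 : Int) * d_y)
             (x + ((runSplit col (lineB board d_y d_x fL (y + d_y) (x + d_x))).1 : Int) * d_x)
      ∧ pvAt board (y + ((runSplit col (lineB board d_y d_x fL (y + d_y) (x + d_x))).1 : Int) * d_y)
                   (x + ((runSplit col (lineB board d_y d_x fL (y + d_y) (x + d_x))).1 : Int) * d_x) = col := by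
  intro m
  induction m with
  | zero =>
    intro fI fL y x c hI hr hfI hfL hc
    have hnN : ¬ InbP (y + d_y) (x + d_x) := by
      intro hN
      have h1 := (remf_pos d_y d_x _ _ hN).1
      have h2 := remf_step d_y d_x y x hd hI
      omega
    rw [lineB_nil board d_y d_x _ _ hnN fL]
    simp only [runSplit, Nat.cast_zero, zero_mul, add_zero, zero_add, one_mul, Nat.sub_zero]
    refine ⟨?_, ?_, ?_, ?_, ?_⟩
    · exact inner_stop board col d_y d_x y x c
        (fun h => hnN ⟨h.2.1, h.2.2.1, h.2.2.2.1, h.2.2.2.2⟩) fI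
    · exact (lineB_nil board d_y d_x _ _ hnN fL).symm
    · exact Nat.le_refl 0
    · exact hI
    · exact hc
  | succ m ih =>
    intro fI fL y x c hI hr hfI hfL hc
    by_cases hN : InbP (y + d_y) (x + d_x)
    · obtain ⟨fI', rfl⟩ : ∃ fI', fI = fI' + 1 := ⟨fI - 1, by omega⟩
      obtain ⟨fL', rfl⟩ : ∃ fL', fL = fL' + 1 := ⟨fL - 1, by omega⟩
      rw [lineB_cons board d_y d_x _ _ hN fL']
      by_cases hc2 : pvAt board (y + d_y) (x + d_x) = col
      · have ihr := ih fI' fL' (y + d_y) (x + d_x) (c + 1) hN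
          (by have := remf_step d_y d_x y x hd hI; omega) (by omega) (by omega) hc2
        obtain ⟨e1, e2, e3, e4, e5⟩ := ihr
        simp only [runSplit, if_pos hc2]
        refine ⟨?_, ?_, ?_, ?_, ?_⟩
        · simp only [innerA]
          rw [if_pos ⟨hc, hN.1, hN.2.1, hN.2.2.1, hN.2.2.2⟩, if_neg (not_not_intro hc2), e1]
          simp only [Prod.mk.injEq]
          refine ⟨by push_cast; try ring, by push_cast; try ring, by push_cast; try ring⟩
        · rw [e2, show fL' - (runSplit col (lineB board d_y d_x fL' (y + d_y + d_y) (x + d_x + d_x))).1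
                    = fL' + 1 - ((runSplit col (lineB board d_y d_x fL' (y + d_y + d_y) (x + d_x + d_x))).1 + 1) from by omega]
          congr 1
          · push_cast; ring
          · push_cast; ring
        · omega
        · have hy : y + (((runSplit col (lineB board d_y d_x fL' (y + d_y + d_y) (x + d_x + d_x))).1 + 1 : Nat) : Int) * d_y
              = y + d_y + ((runSplit col (lineB board d_y d_x fL' (y + d_y + d_y) (x + d_x + d_x))).1 : Int) * d_y := by push_cast; ring
          have hx : x + (((runSplit col (lineB board d_y d_x fL' (y + d_y + d_y) (x + d_x + d_x))).1 + 1 : Nat) : Int) * d_x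
              = x + d_x + ((runSplit col (lineB board d_y d_x fL' (y + d_y + d_y) (x + d_x + d_x))).1 : Int) * d_x := by push_cast; ring
          rw [hy, hx]; exact e4
        · have hy : y + (((runSplit col (lineB board d_y d_x fL' (y + d_y + d_y) (x + d_x + d_x))).1 + 1 : Nat) : Int) * d_y
              = y + d_y + ((runSplit col (lineB board d_y d_x fL' (y + d_y + d_y) (x + d_x + d_x))).1 : Int) * d_y := by push_cast; ring
          have hx : x + (((runSplit col (lineB board d_y d_x fL' (y + d_y + d_y) (x + d_x + d_x))).1 + 1 : Nat) : Int) * d_x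
              = x + d_x + ((runSplit col (lineB board d_y d_x fL' (y + d_y + d_y) (x + d_x + d_x))).1 : Int) * d_x := by push_cast; ring
          rw [hy, hx]; exact e5
      · simp only [runSplit, if_neg hc2]
        simp only [Nat.cast_zero, zero_mul, add_zero, zero_add, one_mul, Nat.sub_zero]
        refine ⟨?_, ?_, ?_, ?_, ?_⟩
        · simp only [innerA]
          rw [if_pos ⟨hc, hN.1, hN.2.1, hN.2.2.1, hN.2.2.2⟩, if_pos hc2]
        · exact (lineB_cons board d_y d_x _ _ hN fL').symm
        · exact Nat.zero_le _
        · exact hI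
        · exact hc
    · rw [lineB_nil board d_y d_x _ _ hN fL]
      simp only [runSplit, Nat.cast_zero, zero_mul, add_zero, zero_add, one_mul, Nat.sub_zero]
      refine ⟨?_, ?_, ?_, ?_, ?_⟩
      · exact inner_stop board col d_y d_x y x c
          (fun h => hN ⟨h.2.1, h.2.2.1, h.2.2.2.1, h.2.2.2.2⟩) fI
      · exact (lineB_nil board d_y d_x _ _ hN fL).symm
      · exact Nat.zero_le _
      · exact hI
      · exact hc

theorem head_flank (board : List (List String)) (d_y d_x y x : Int) :
    (decide ((lineB board d_y d_x 16 y x).head? = some " ") : Bool)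
      = (decide (InbP y x) && decide (pvAt board y x = " ")) := by
  by_cases h : InbP y x
  · have e := lineB_cons board d_y d_x y x h 15
    norm_num at e
    rw [e]
    simp [h]
  · rw [lineB_nil board d_y d_x y x h 16]
    simp [h]

theorem isBounded_cases (board : List (List String)) (y0 x0 d_y d_x i len : Int) (lo ro : Bool)
    (hlo : lo = (decide (InbP (y0 + (i - 1) * d_y) (x0 + (i - 1) * d_x))
                 && decide (pvAt board (y0 + (i - 1) * d_y) (x0 + (i - 1) * d_x) = " ")))
    (hro : ro = (decide (InbP (y0 + (i + len) * d_y) (x0 + (i + len) * d_x))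
                 && decide (pvAt board (y0 + (i + len) * d_y) (x0 + (i + len) * d_x) = " "))) :
    isBounded board (y0 + (i + len - 1) * d_y) (x0 + (i + len - 1) * d_x) len d_y d_x
      = if lo && ro then "OPEN" else if !lo && !ro then "CLOSED" else "SEMIOPEN" := by
  simp only [isBounded]
  rw [show y0 + (i + len - 1) * d_y - (len - 1) * d_y - d_y = y0 + (i - 1) * d_y from by ring,
      show x0 + (i + len - 1) * d_x - (len - 1) * d_x - d_x = x0 + (i - 1) * d_x from by ring,
      show y0 + (i + len - 1) * d_y + d_y = y0 + (i + len) * d_y from by ring,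
      show x0 + (i + len - 1) * d_x + d_x = x0 + (i + len) * d_x from by ring]
  have hb0 : (decide (8 > x0 + (i - 1) * d_x ∧ x0 + (i - 1) * d_x ≥ 0 ∧
                      8 > y0 + (i - 1) * d_y ∧ y0 + (i - 1) * d_y ≥ 0) : Bool)
      = decide (InbP (y0 + (i - 1) * d_y) (x0 + (i - 1) * d_x)) := by
    simp only [decide_eq_decide, InbP]
    constructor
    · rintro ⟨a, b, c, d⟩; exact ⟨d, c, b, a⟩
    · rintro ⟨a, b, c, d⟩; exact ⟨d, c, b, a⟩
  have hb1 : (decide (8 > x0 + (i + len) * d_x ∧ x0 + (i + len) * d_x ≥ 0 ∧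
                      8 > y0 + (i + len) * d_y ∧ y0 + (i + len) * d_y ≥ 0) : Bool)
      = decide (InbP (y0 + (i + len) * d_y) (x0 + (i + len) * d_x)) := by
    simp only [decide_eq_decide, InbP]
    constructor
    · rintro ⟨a, b, c, d⟩; exact ⟨d, c, b, a⟩
    · rintro ⟨a, b, c, d⟩; exact ⟨d, c, b, a⟩
  rw [hb0, hb1, ← hlo, ← hro]

-- A's outer loop equals B's scan over the (suffix of the) line
theorem outer_spec (board : List (List String)) (col : String) (y0 x0 len d_y d_x : Int)
    (hd : ¬(d_y = 0 ∧ d_x = 0)) (hb : 8 ≤ (board.length : Int)) :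
    ∀ (fO : Nat) (i co cs : Int) (lo : Bool),
      0 ≤ i →
      i + ((lineB board d_y d_x 16 (y0 + i * d_y) (x0 + i * d_x)).length : Int) ≤ 8 →
      ((lineB board d_y d_x 16 (y0 + i * d_y) (x0 + i * d_x)).length : Int) ≤ (fO : Int) →
      lo = (decide (InbP (y0 + (i - 1) * d_y) (x0 + (i - 1) * d_x))
            && decide (pvAt board (y0 + (i - 1) * d_y) (x0 + (i - 1) * d_x) = " ")) →
      outerA board col y0 x0 len d_y d_x fO i co cs
        = scanB col len (lineB board d_y d_x 16 (y0 + i * d_y) (x0 + i * d_x)) lo co cs := by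
  intro fO
  induction fO with
  | zero =>
    intro i co cs lo h0 hi8 hfO hlo
    have hnil : lineB board d_y d_x 16 (y0 + i * d_y) (x0 + i * d_x) = [] := by
      have hnn : (lineB board d_y d_x 16 (y0 + i * d_y) (x0 + i * d_x)).length = 0 := by omega
      exact List.eq_nil_of_length_eq_zero hnn
    rw [hnil]
    simp only [outerA, scanB]
  | succ f ihO =>
    intro i co cs lo h0 hi8 hfO hlo
    by_cases hIn : InbP (y0 + i * d_y) (x0 + i * d_x)
    case neg =>
      rw [lineB_nil board d_y d_x _ _ hIn 16]
      simp only [outerA, scanB]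
      by_cases hi : i < (board.length : Int)
      · rw [if_pos hi, if_pos (by simpa [InbP] using hIn)]
      · rw [if_neg hi]
    case pos =>
      have hcons := lineB_cons board d_y d_x (y0 + i * d_y) (x0 + i * d_x) hIn 15
      norm_num at hcons
      set Z := lineB board d_y d_x 15 (y0 + i * d_y + d_y) (x0 + i * d_x + d_x) with hZ
      have hZlen : ((lineB board d_y d_x 16 (y0 + i * d_y) (x0 + i * d_x)).length : Int)
          = 1 + (Z.length : Int) := by
        rw [hcons]; push_cast [List.length_cons]; ring
      have hi : i < (board.length : Int) := by omega
      have hZ7 : (Z.length : Int) ≤ 7 := by omega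
      have MAIN : ∃ K : Nat,
          innerA board col d_y d_x 16 (y0 + i * d_y) (x0 + i * d_x) 1
              = (y0 + (i + (K : Int)) * d_y, x0 + (i + (K : Int)) * d_x, 1 + (K : Int))
          ∧ (if pvAt board (y0 + i * d_y) (x0 + i * d_x) = col then runSplit col Z else (0, Z)).1 = K
          ∧ (if pvAt board (y0 + i * d_y) (x0 + i * d_x) = col then runSplit col Z else (0, Z)).2
              = lineB board d_y d_x 16 (y0 + (i + (K : Int) + 1) * d_y) (x0 + (i + (K : Int) + 1) * d_x)
          ∧ InbP (y0 + (i + (K : Int)) * d_y) (x0 + (i + (K : Int)) * d_x)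
          ∧ pvAt board (y0 + (i + (K : Int)) * d_y) (x0 + (i + (K : Int)) * d_x)
              = pvAt board (y0 + i * d_y) (x0 + i * d_x)
          ∧ ((lineB board d_y d_x 16 (y0 + (i + (K : Int) + 1) * d_y) (x0 + (i + (K : Int) + 1) * d_x)).length : Int)
              = (Z.length : Int) - (K : Int)
          ∧ (K : Int) ≤ (Z.length : Int) := by
        by_cases hc : pvAt board (y0 + i * d_y) (x0 + i * d_x) = col
        · obtain ⟨e1, e2, e3, e4, e5⟩ := inner_spec board col d_y d_x hd 8 16 15
            (y0 + i * d_y) (x0 + i * d_x) 1 hIn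
            (by have := (remf_pos d_y d_x _ _ hIn).2; push_cast; omega)
            (by norm_num) (by norm_num) hc
          rw [← hZ] at e1 e2 e3 e4 e5
          have hKZ := runSplit_len col Z
          have hK7 : ((runSplit col Z).1 : Int) ≤ 7 := by omega
          have h3 : (if pvAt board (y0 + i * d_y) (x0 + i * d_x) = col then runSplit col Z else (0, Z)).2
              = lineB board d_y d_x 16 (y0 + (i + ((runSplit col Z).1 : Int) + 1) * d_y)
                  (x0 + (i + ((runSplit col Z).1 : Int) + 1) * d_x) := by
            rw [if_pos hc, e2,
                show y0 + i * d_y + (((runSplit col Z).1 : Int) + 1) * d_y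
                    = y0 + (i + ((runSplit col Z).1 : Int) + 1) * d_y from by ring,
                show x0 + i * d_x + (((runSplit col Z).1 : Int) + 1) * d_x
                    = x0 + (i + ((runSplit col Z).1 : Int) + 1) * d_x from by ring]
            exact lineB_congr board d_y d_x hd 8 (15 - (runSplit col Z).1) 16 _ _
              (fun h => (remf_pos d_y d_x _ _ h).2) (by omega) (by norm_num)
          refine ⟨(runSplit col Z).1, ?_, ?_, h3, ?_, ?_, ?_, ?_⟩
          · rw [e1]; simp only [Prod.mk.injEq]
            refine ⟨by ring, by ring, trivial⟩
          · rw [if_pos hc]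
          · rw [show y0 + (i + ((runSplit col Z).1 : Int)) * d_y
                    = y0 + i * d_y + ((runSplit col Z).1 : Int) * d_y from by ring,
                show x0 + (i + ((runSplit col Z).1 : Int)) * d_x
                    = x0 + i * d_x + ((runSplit col Z).1 : Int) * d_x from by ring]
            exact e4
          · rw [show y0 + (i + ((runSplit col Z).1 : Int)) * d_y
                    = y0 + i * d_y + ((runSplit col Z).1 : Int) * d_y from by ring,
                show x0 + (i + ((runSplit col Z).1 : Int)) * d_x
                    = x0 + i * d_x + ((runSplit col Z).1 : Int) * d_x from by ring]
            exact e5.trans hc.symm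
          · have h4 := congrArg List.length h3
            rw [if_pos hc] at h4
            omega
          · omega
        · have hz16 : Z = lineB board d_y d_x 16 (y0 + i * d_y + d_y) (x0 + i * d_x + d_x) := by
            rw [hZ]
            exact lineB_congr board d_y d_x hd 8 15 16 _ _
              (fun h => (remf_pos d_y d_x _ _ h).2) (by norm_num) (by norm_num)
          refine ⟨0, ?_, ?_, ?_, ?_, ?_, ?_, ?_⟩
          · rw [inner_stop board col d_y d_x _ _ 1 (fun h => hc h.1) 16]
            simp only [Prod.mk.injEq]
            refine ⟨by push_cast; try ring, by push_cast; try ring, by push_cast; try ring⟩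
          · rw [if_neg hc]
          · rw [if_neg hc,
                show y0 + (i + ((0 : Nat) : Int) + 1) * d_y = y0 + i * d_y + d_y from by push_cast; ring,
                show x0 + (i + ((0 : Nat) : Int) + 1) * d_x = x0 + i * d_x + d_x from by push_cast; ring]
            exact hz16
          · rw [show y0 + (i + ((0 : Nat) : Int)) * d_y = y0 + i * d_y from by push_cast; ring,
                show x0 + (i + ((0 : Nat) : Int)) * d_x = x0 + i * d_x from by push_cast; ring]
            exact hIn
          · rw [show y0 + (i + ((0 : Nat) : Int)) * d_y = y0 + i * d_y from by push_cast; ring,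
                show x0 + (i + ((0 : Nat) : Int)) * d_x = x0 + i * d_x from by push_cast; ring]
          · rw [show y0 + (i + ((0 : Nat) : Int) + 1) * d_y = y0 + i * d_y + d_y from by push_cast; ring,
                show x0 + (i + ((0 : Nat) : Int) + 1) * d_x = x0 + i * d_x + d_x from by push_cast; ring,
                ← hz16]
            push_cast; ring
          · push_cast; omega
      obtain ⟨K, m1, m2, m3, m4, m5, m6, m7⟩ := MAIN
      have hrec : ∀ a b : Int,
          outerA board col y0 x0 len d_y d_x f (i + (1 + (K : Int))) a b
            = scanB col len
                (lineB board d_y d_x 16 (y0 + (i + (K : Int) + 1) * d_y) (x0 + (i + (K : Int) + 1) * d_x))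
                (decide (pvAt board (y0 + i * d_y) (x0 + i * d_x) = " ")) a b := by
        intro a b
        have hpos1 : y0 + (i + (1 + (K : Int))) * d_y = y0 + (i + (K : Int) + 1) * d_y := by ring
        have hpos2 : x0 + (i + (1 + (K : Int))) * d_x = x0 + (i + (K : Int) + 1) * d_x := by ring
        have hpos3 : y0 + (i + (1 + (K : Int)) - 1) * d_y = y0 + (i + (K : Int)) * d_y := by ring
        have hpos4 : x0 + (i + (1 + (K : Int)) - 1) * d_x = x0 + (i + (K : Int)) * d_x := by ring
        have h := ihO (i + (1 + (K : Int))) a b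
            (decide (pvAt board (y0 + i * d_y) (x0 + i * d_x) = " "))
            (by omega)
            (by rw [hpos1, hpos2]; omega)
            (by rw [hpos1, hpos2]; omega)
            (by rw [hpos3, hpos4]; simp [m4, m5])
        rw [hpos1, hpos2] at h
        exact h
      rw [hcons]
      simp only [outerA, scanB]
      rw [if_pos hi, if_neg (not_not_intro (show _ from by simpa [InbP] using hIn)), m1]
      dsimp only
      rw [m2, m3, head_flank board d_y d_x]
      by_cases hlen1 : (1 : Int) + (K : Int) = len
      · rw [if_neg (not_not_intro hlen1), if_pos hlen1]
        have hK : (K : Int) = len - 1 := by omega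
        rw [show y0 + (i + (K : Int)) * d_y = y0 + (i + len - 1) * d_y from by rw [hK]; ring,
            show x0 + (i + (K : Int)) * d_x = x0 + (i + len - 1) * d_x from by rw [hK]; ring,
            show y0 + (i + (K : Int) + 1) * d_y = y0 + (i + len) * d_y from by rw [hK]; ring,
            show x0 + (i + (K : Int) + 1) * d_x = x0 + (i + len) * d_x from by rw [hK]; ring]
        rw [isBounded_cases board y0 x0 d_y d_x i len lo
            (decide (InbP (y0 + (i + len) * d_y) (x0 + (i + len) * d_x))
             && decide (pvAt board (y0 + (i + len) * d_y) (x0 + (i + len) * d_x) = " ")) hlo rfl]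
        have hrec' : ∀ a b : Int,
            outerA board col y0 x0 len d_y d_x f (i + (1 + (K : Int))) a b
              = scanB col len
                  (lineB board d_y d_x 16 (y0 + (i + len) * d_y) (x0 + (i + len) * d_x))
                  (decide (pvAt board (y0 + i * d_y) (x0 + i * d_x) = " ")) a b := by
          intro a b
          have h := hrec a b
          rw [show y0 + (i + (K : Int) + 1) * d_y = y0 + (i + len) * d_y from by rw [hK]; ring,
              show x0 + (i + (K : Int) + 1) * d_x = x0 + (i + len) * d_x from by rw [hK]; ring] at h
          exact h
        cases lo <;>
          cases hROv : (decide (InbP (y0 + (i + len) * d_y) (x0 + (i + len) * d_x))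
              && decide (pvAt board (y0 + (i + len) * d_y) (x0 + (i + len) * d_x) = " ")) <;>
          simp only [hROv, Bool.and_false, Bool.and_true, Bool.false_and, Bool.true_and,
            Bool.or_false, Bool.or_true, Bool.false_or, Bool.true_or, Bool.not_false, Bool.not_true] <;>
          norm_num <;>
          exact hrec' _ _
      · rw [if_pos hlen1, if_neg hlen1]
        dsimp only
        exact hrec _ _

-- ===== VERDICT (by name: the statement is the Claim_ definition above) =====
theorem detect_row_spec : Claim_equal_detect_row := by
  intro board col y0 x0 len d_y d_x _ hPre
  rcases hPre with ⟨hb, _, hd⟩ | ⟨hs, _⟩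
  case inr =>
    unfold Spec_detect_row detect_row detect_row_alt
    have hB : lineB board d_y d_x 16 y0 x0 = [] := lineB_nil board d_y d_x y0 x0 hs 16
    rw [hB]
    cases hL : board.length with
    | zero => simp only [outerA, scanB]
    | succ n =>
      simp only [outerA, scanB]
      rw [if_pos (by push_cast; omega), if_pos (by
        simpa [show y0 + 0 * d_y = y0 from by ring, show x0 + 0 * d_x = x0 from by ring] using hs)]
  unfold Spec_detect_row detect_row detect_row_alt
  have h0 : (0 : Int) + ((lineB board d_y d_x 16 (y0 + 0 * d_y) (x0 + 0 * d_x)).length : Int) ≤ 8 := by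
    have := lineB_len8 board d_y d_x hd 16 (y0 + 0 * d_y) (x0 + 0 * d_x); omega
  have h1 : ((lineB board d_y d_x 16 (y0 + 0 * d_y) (x0 + 0 * d_x)).length : Int) ≤ (board.length : Int) := by
    have := lineB_len8 board d_y d_x hd 16 (y0 + 0 * d_y) (x0 + 0 * d_x); omega
  have h := outer_spec board col y0 x0 len d_y d_x hd (by exact_mod_cast hb)
      board.length 0 0 0 _ le_rfl h0 h1 rfl
  rw [show y0 + 0 * d_y = y0 by ring, show x0 + 0 * d_x = x0 by ring,
      show y0 + (0 - 1) * d_y = y0 - d_y by ring, show x0 + (0 - 1) * d_x = x0 - d_x by ring] at h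
  simp only [InbP] at h
  exact h
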